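-- pv_equiv track=rewrite | github.com/Moysenko/Text-Generator | tokens_parser.py | _split_punctuation
-- ===== SOURCE A (Python) =====
-- def _split_punctuation(word):
--     first_letter = 0
--     prefix = []
--     while first_letter < len(word) and not word[first_letter].isalpha():
--         prefix.append(word[first_letter])
--         first_letter += 1
--
--     last_letter = len(word) - 1
--     suffix = []
--     while last_letter > first_letter and not word[last_letter].isalpha():
--         suffix.append(word[last_letter])
--         last_letter -= 1
--
--     middle = []
--     if first_letter <= last_letter:
--         middle = [word[first_letter: last_letter + 1].lower()]
--
--     return prefix + middle + suffix[::-1]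
-- ===== SOURCE B (Python) =====
-- def _split_punctuation(word):
--     alpha_idx = [i for i, c in enumerate(word) if c.isalpha()]
--     if not alpha_idx:
--         return list(word)
--     first, last = alpha_idx[0], alpha_idx[-1]
--     return list(word[:first]) + [word[first:last + 1].lower()] + list(word[last + 1:])
-- ===== Notes on version B (the rewrite author's own statement) =====
-- stated objective: simpler
-- what changed: Replaces the two directional scan-and-append while loops plus suffix reversal by one pass collecting alpha indices, then three slices (chars / lowered middle / chars).
import Mathlib
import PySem

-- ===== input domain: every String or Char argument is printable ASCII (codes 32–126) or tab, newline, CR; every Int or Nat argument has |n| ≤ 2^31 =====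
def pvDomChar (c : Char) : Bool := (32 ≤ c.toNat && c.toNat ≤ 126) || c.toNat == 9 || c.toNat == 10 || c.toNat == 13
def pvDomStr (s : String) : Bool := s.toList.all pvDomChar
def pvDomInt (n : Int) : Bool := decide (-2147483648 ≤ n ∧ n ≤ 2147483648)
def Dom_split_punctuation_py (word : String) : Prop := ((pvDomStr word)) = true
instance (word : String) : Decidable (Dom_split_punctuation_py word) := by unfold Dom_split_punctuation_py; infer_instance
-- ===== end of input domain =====

-- B replaces A's two directional scan-and-append while loops (plus suffix reversal)
-- by one pass collecting the alpha indices and three slices; objective: simpler.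


-- ===== PORT A =====
-- first while loop of A: walk forward from index i while the char is not alpha,
-- collecting the 1-char strings; returns (prefix, final first_letter)
def pvAFwd (cs : List Char) (i : Nat) : List String × Nat :=
  if h : i < cs.length ∧ ¬ PySem.Chars.isalpha (PySem.List.pyGetD cs (i : Int) ' ') then
    let r := pvAFwd cs (i + 1)
    (String.ofList [PySem.List.pyGetD cs (i : Int) ' '] :: r.1, r.2)
  else ([], i)
termination_by cs.length - i
decreasing_by omega

-- second while loop of A: walk backward from index j while j > first and char not
-- alpha, collecting the 1-char strings in scan order; returns (suffix, final last_letter)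
def pvABwd (cs : List Char) (first : Nat) (j : Int) : List String × Int :=
  if h : (first : Int) < j ∧ ¬ PySem.Chars.isalpha (PySem.List.pyGetD cs j ' ') then
    let r := pvABwd cs first (j - 1)
    (String.ofList [PySem.List.pyGetD cs j ' '] :: r.1, r.2)
  else ([], j)
termination_by (j - first).toNat
decreasing_by omega

def split_punctuation_py (word : String) : List String :=
  let cs := word.toList
  let p := pvAFwd cs 0
  let s := pvABwd cs p.2 ((cs.length : Int) - 1)
  let middle : List String :=
    if (p.2 : Int) ≤ s.2 then
      [String.ofList (PySem.Chars.lower (PySem.List.slice cs (some (p.2 : Int)) (some (s.2 + 1))))]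
    else []
  -- suffix[::-1] is List.reverse (PySem.List.slice?_none_none_neg_one)
  p.1 ++ middle ++ s.1.reverse

-- ===== PORT B =====
def split_punctuation_py_alt (word : String) : List String :=
  let cs := word.toList
  let alphaIdx := ((PySem.List.enumerate cs 0).filter (fun p => PySem.Chars.isalpha p.2)).map Prod.fst
  if alphaIdx = [] then cs.map (fun c => String.ofList [c])
  else
    let first := PySem.List.pyGetD alphaIdx 0 0
    let last := PySem.List.pyGetD alphaIdx (-1) 0
    (PySem.List.slice cs none (some first)).map (fun c => String.ofList [c])
      ++ [String.ofList (PySem.Chars.lower (PySem.List.slice cs (some first) (some (last + 1))))]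
      ++ (PySem.List.slice cs (some (last + 1)) none).map (fun c => String.ofList [c])

-- ===== PRECONDITION & SPEC =====
def Spec_split_punctuation_py (word : String) (out : List String) : Prop := out = split_punctuation_py_alt word
instance (word : String) (out : List String) : Decidable (Spec_split_punctuation_py word out) := by unfold Spec_split_punctuation_py; infer_instance

-- ===== CLAIM (what is proved, stated in full; the proofs are below) =====
def Claim_equal_split_punctuation_py : Prop := ∀ (word : String), Dom_split_punctuation_py word → Spec_split_punctuation_py word (split_punctuation_py word)

-- ===== LEMMAS AND PROOFS =====

-- abbreviation used only in the proofs
def pvSing (c : Char) : String := String.ofList [c]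

-- evaluation of A's forward loop on a decomposed list
theorem pvAFwd_eval (P R : List Char)
    (hP : ∀ c ∈ P, ¬ PySem.Chars.isalpha c)
    (hR : R = [] ∨ ∃ r0 R', R = r0 :: R' ∧ PySem.Chars.isalpha r0) :
    ∀ X : List Char, pvAFwd (X ++ P ++ R) X.length = (P.map pvSing, X.length + P.length) := by
  induction P with
  | nil =>
    intro X
    rw [pvAFwd]
    rcases hR with rfl | ⟨r0, R', rfl, hr⟩
    · simp
    · have hget : PySem.List.pyGetD (X ++ [] ++ r0 :: R') (X.length : Int) ' ' = r0 := by
        simp [PySem.List.pyGetD_natCast]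
      rw [dif_neg (by simp [hr])]
      simp
  | cons p P ih =>
    intro X
    have hget : PySem.List.pyGetD (X ++ p :: P ++ R) (X.length : Int) ' ' = p := by
      simp [PySem.List.pyGetD_natCast, List.getD_eq_getElem?_getD]
    have hlen : X.length < (X ++ p :: P ++ R).length := by simp
    have hp : ¬ PySem.Chars.isalpha p := hP p (by simp)
    rw [pvAFwd, dif_pos ⟨hlen, by rw [hget]; exact hp⟩]
    have heq : X ++ p :: P ++ R = (X ++ [p]) ++ P ++ R := by simp
    have hl : X.length + 1 = (X ++ [p]).length := by simp
    rw [hget, heq, hl, ih (fun c hc => hP c (by simp [hc])) (X ++ [p])]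
    simp [pvSing]
    omega

-- evaluation of A's backward loop: X ends with an alpha char, T is all non-alpha
theorem pvABwd_eval (T : List Char) (hT : ∀ c ∈ T, ¬ PySem.Chars.isalpha c)
    (X : List Char) (f : Nat) (hf : f < X.length)
    (hX : ∃ X₀ x, X = X₀ ++ [x] ∧ PySem.Chars.isalpha x) :
    ∀ E : List Char, pvABwd (X ++ T ++ E) f ((X.length : Int) + T.length - 1) =
      (T.reverse.map pvSing, (X.length : Int) - 1) := by
  induction T using List.reverseRecOn with
  | nil =>
    intro E
    obtain ⟨X₀, x, rfl, hx⟩ := hX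
    rw [pvABwd]
    have hget : PySem.List.pyGetD ((X₀ ++ [x]) ++ [] ++ E) ((((X₀ ++ [x]).length : Int) + ([] : List Char).length - 1)) ' ' = x := by
      have : (((X₀ ++ [x]).length : Int) + ([] : List Char).length - 1) = ((X₀.length : Nat) : Int) := by
        simp
      rw [this, PySem.List.pyGetD_natCast]
      simp [List.getD_eq_getElem?_getD]
    rw [dif_neg (by rw [hget]; simp [hx])]
    simp
  | append_singleton T t ih =>
    intro E
    have hj : ((X.length : Int) + (T ++ [t]).length - 1) = (((X ++ T).length : Nat) : Int) := by
      simp; omega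
    have hget : PySem.List.pyGetD (X ++ (T ++ [t]) ++ E) (((X ++ T).length : Nat) : Int) ' ' = t := by
      rw [PySem.List.pyGetD_natCast]
      have : X ++ (T ++ [t]) ++ E = (X ++ T) ++ (t :: E) := by simp
      rw [this]
      simp [List.getD_eq_getElem?_getD]
    have ht : ¬ PySem.Chars.isalpha t := hT t (by simp)
    rw [pvABwd, hj, dif_pos ⟨by simp; omega, by rw [hget]; exact ht⟩]
    have harg : (((X ++ T).length : Nat) : Int) - 1 = (X.length : Int) + (T.length : Int) - 1 := by
      simp
    have hcs : X ++ (T ++ [t]) ++ E = X ++ T ++ (t :: E) := by simp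
    rw [hget, harg, hcs, ih (fun c hc => hT c (by simp [hc])) (t :: E)]
    simp [pvSing]

-- enumerate distributes over append
theorem pvEnum_append {α : Type} (xs ys : List α) (s : Int) :
    PySem.List.enumerate (xs ++ ys) s =
      PySem.List.enumerate xs s ++ PySem.List.enumerate ys (s + xs.length) := by
  induction xs generalizing s with
  | nil => simp [PySem.List.enumerate_nil]
  | cons x xs ih =>
    simp [PySem.List.enumerate_cons, ih, add_assoc]
    ring_nf

-- B's alpha-index list distributes over append
theorem pvAI_append (xs ys : List Char) (s : Int) :
    ((PySem.List.enumerate (xs ++ ys) s).filter (fun p => PySem.Chars.isalpha p.2)).map Prod.fst =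
      ((PySem.List.enumerate xs s).filter (fun p => PySem.Chars.isalpha p.2)).map Prod.fst ++
      ((PySem.List.enumerate ys (s + xs.length)).filter (fun p => PySem.Chars.isalpha p.2)).map Prod.fst := by
  rw [pvEnum_append, List.filter_append, List.map_append]

theorem pvAI_nil (ys : List Char) (s : Int) (h : ∀ c ∈ ys, ¬ PySem.Chars.isalpha c) :
    ((PySem.List.enumerate ys s).filter (fun p => PySem.Chars.isalpha p.2)).map Prod.fst = [] := by
  induction ys generalizing s with
  | nil => simp [PySem.List.enumerate_nil]
  | cons y ys ih =>
    have hy := h y (by simp)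
    simp [PySem.List.enumerate_cons, hy, ih _ (fun c hc => h c (by simp [hc]))]

-- decomposition of a list into an all-non-alpha suffix run
theorem pvDecompZ (Z : List Char) :
    ∃ Y T, Z = Y ++ T ∧ (∀ c ∈ T, ¬ PySem.Chars.isalpha c) ∧
      (Y = [] ∨ ∃ Y₀ y, Y = Y₀ ++ [y] ∧ PySem.Chars.isalpha y) := by
  induction Z with
  | nil => exact ⟨[], [], by simp⟩
  | cons c Z ih =>
    obtain ⟨Y, T, rfl, hT, hY⟩ := ih
    rcases hY with rfl | ⟨Y₀, y, rfl, hy⟩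
    · by_cases hc : PySem.Chars.isalpha c
      · exact ⟨[c], T, by simp, hT, Or.inr ⟨[], c, by simp, hc⟩⟩
      · exact ⟨[], c :: T, by simp, by simpa [hc] using hT, Or.inl rfl⟩
    · exact ⟨c :: (Y₀ ++ [y]), T, by simp, hT, Or.inr ⟨c :: Y₀, y, by simp, hy⟩⟩

-- total decomposition of a list by the alpha predicate
theorem pvDecomp (cs : List Char) :
    (∀ c ∈ cs, ¬ PySem.Chars.isalpha c) ∨
    (∃ P r0 Y T, cs = P ++ (r0 :: Y) ++ T ∧
      (∀ c ∈ P, ¬ PySem.Chars.isalpha c) ∧ PySem.Chars.isalpha r0 ∧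
      (∀ c ∈ T, ¬ PySem.Chars.isalpha c) ∧
      (Y = [] ∨ ∃ Y₀ y, Y = Y₀ ++ [y] ∧ PySem.Chars.isalpha y)) := by
  induction cs with
  | nil => exact Or.inl (by simp)
  | cons c cs ih =>
    by_cases hc : PySem.Chars.isalpha c
    · obtain ⟨Y, T, rfl, hT, hY⟩ := pvDecompZ cs
      exact Or.inr ⟨[], c, Y, T, by simp, by simp, hc, hT, hY⟩
    · rcases ih with h | ⟨P, r0, Y, T, rfl, hP, hr, hT, hY⟩
      · exact Or.inl (by simpa [hc] using h)
      · exact Or.inr ⟨c :: P, r0, Y, T, by simp, by simpa [hc] using hP, hr, hT, hY⟩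

-- ===== VERDICT (by name: the statement is the Claim_ definition above) =====
theorem split_punctuation_py_spec : Claim_equal_split_punctuation_py := by
  intro word _
  unfold Spec_split_punctuation_py split_punctuation_py split_punctuation_py_alt
  generalize word.toList = cs
  rcases pvDecomp cs with hna | ⟨P, r0, Y, T, hcs, hP, hr, hT, hY⟩
  · -- no alpha character at all
    have hf := pvAFwd_eval cs [] hna (Or.inl rfl) []
    simp only [List.nil_append, List.append_nil, List.length_nil] at hf
    simp only [hf]
    rw [pvABwd, dif_neg (fun h => absurd h.1 (by omega))]
    rw [if_neg (by omega), if_pos (pvAI_nil cs 0 hna)]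
    simp [pvSing]
  · subst hcs
    have hXend : ∃ X₀ x, P ++ (r0 :: Y) = X₀ ++ [x] ∧ PySem.Chars.isalpha x := by
      rcases hY with rfl | ⟨Y₀, y, rfl, hy⟩
      · exact ⟨P, r0, by simp, hr⟩
      · exact ⟨P ++ r0 :: Y₀, y, by simp, hy⟩
    have hfwd := pvAFwd_eval P ((r0 :: Y) ++ T) hP (Or.inr ⟨r0, Y ++ T, by simp, hr⟩) []
    simp only [List.nil_append, List.length_nil, Nat.zero_add] at hfwd
    have hbwd := pvABwd_eval T hT (P ++ (r0 :: Y)) P.length (by simp) hXend []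
    simp only [List.append_nil] at hbwd
    simp only [List.append_assoc, List.cons_append] at hfwd hbwd ⊢
    simp only [hfwd]
    have hj : ((P ++ r0 :: (Y ++ T)).length : Int) - 1 = ((P ++ r0 :: Y).length : Int) + (T.length : Int) - 1 := by
      simp; omega
    rw [hj, hbwd]
    have hAI : List.map Prod.fst (List.filter (fun p => PySem.Chars.isalpha p.2)
        (PySem.List.enumerate (P ++ r0 :: (Y ++ T)) 0)) =
        ((P.length : Int)) :: List.map Prod.fst (List.filter (fun p => PySem.Chars.isalpha p.2)
          (PySem.List.enumerate Y ((P.length : Int) + 1))) := by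
      rw [pvAI_append P (r0 :: (Y ++ T)) 0, pvAI_nil P 0 hP]
      simp only [List.nil_append, zero_add]
      rw [PySem.List.enumerate_cons]
      simp only [List.filter_cons, hr, if_pos, List.map_cons]
      rw [pvAI_append Y T ((P.length : Int) + 1), pvAI_nil T _ hT]
      simp
    have hlastAI : PySem.List.pyGetD ((P.length : Int) :: List.map Prod.fst
        (List.filter (fun p => PySem.Chars.isalpha p.2)
          (PySem.List.enumerate Y ((P.length : Int) + 1)))) (-1) 0 = (P.length : Int) + Y.length := by
      rcases hY with rfl | ⟨Y₀, y, rfl, hy⟩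
      · simp [PySem.List.enumerate_nil, PySem.List.pyGetD_neg_one]
      · rw [pvAI_append Y₀ [y] ((P.length : Int) + 1)]
        have h1 : List.map Prod.fst (List.filter (fun p => PySem.Chars.isalpha p.2)
            (PySem.List.enumerate [y] ((P.length : Int) + 1 + (Y₀.length : Int)))) =
            [(P.length : Int) + 1 + (Y₀.length : Int)] := by
          simp [PySem.List.enumerate_cons, PySem.List.enumerate_nil, hy]
        rw [h1]
        rw [show ((P.length : Int) :: (List.map Prod.fst (List.filter (fun p => PySem.Chars.isalpha p.2)
            (PySem.List.enumerate Y₀ ((P.length : Int) + 1))) ++ [(P.length : Int) + 1 + (Y₀.length : Int)])) =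
            ((P.length : Int) :: List.map Prod.fst (List.filter (fun p => PySem.Chars.isalpha p.2)
            (PySem.List.enumerate Y₀ ((P.length : Int) + 1)))) ++ [(P.length : Int) + 1 + (Y₀.length : Int)] from by simp]
        rw [PySem.List.pyGetD_neg_one_append_singleton]
        simp
        omega
    have hA2 : ((P ++ r0 :: Y).length : Int) - 1 = (P.length : Int) + (Y.length : Int) := by
      simp
      omega
    dsimp only
    rw [hA2]
    rw [if_pos (by omega : (P.length : Int) ≤ (P.length : Int) + (Y.length : Int))]
    rw [hAI, if_neg (by simp), PySem.List.pyGetD_zero_cons, hlastAI]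
    have hs1 : PySem.List.slice (P ++ r0 :: (Y ++ T)) none (some (P.length : Int)) = P := by
      rw [PySem.List.slice_to_natCast]
      exact List.take_left
    have hcast : (P.length : Int) + (Y.length : Int) + 1 = (((P.length + Y.length + 1 : Nat)) : Int) := by
      push_cast; ring
    have hs2 : PySem.List.slice (P ++ r0 :: (Y ++ T)) (some (P.length : Int))
        (some ((P.length : Int) + (Y.length : Int) + 1)) = r0 :: Y := by
      rw [hcast, PySem.List.slice_natCast, List.drop_left]
      have : P.length + Y.length + 1 - P.length = Y.length + 1 := by omega
      rw [this]
      simp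
    have hs3 : PySem.List.slice (P ++ r0 :: (Y ++ T)) (some ((P.length : Int) + (Y.length : Int) + 1)) none = T := by
      rw [hcast, PySem.List.slice_from_natCast]
      rw [show P ++ r0 :: (Y ++ T) = (P ++ r0 :: Y) ++ T from by simp]
      have : P.length + Y.length + 1 = (P ++ r0 :: Y).length := by simp; omega
      rw [this, List.drop_left]
    rw [hs1, hs2, hs3]
    simp only [List.map_reverse, List.reverse_reverse, List.singleton_append, List.nil_append]
    rfl
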